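-- pv_equiv track=rewrite | github.com/QerkuX/advanced-calculator | calculator.py | hierarchy
-- ===== SOURCE A (Python) =====
-- def hierarchy(symbols):
--     symbolPos = [[],[]]
--     score = {
--         '+': 0,
--         '-': 0,
--         '*': 1,
--         '/': 1
--     }
--
--     for symbol in range(len(symbols)):
--         symbolPos[score[symbols[symbol]]].append(symbol)
--
--     return symbolPos[1] + symbolPos[0]
-- ===== SOURCE B (Python) =====
-- def hierarchy(symbols):
--     score = {
--         '+': 0,
--         '-': 0,
--         '*': 1,
--         '/': 1
--     }
--     return sorted(range(len(symbols)), key=lambda i: score[symbols[i]], reverse=True)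
-- ===== Notes on version B (the rewrite author's own statement) =====
-- stated objective: idiomatic
-- what changed: Replaces the two-bucket partition (append per bucket, then concatenate) with a single stable descending sort of the index range keyed by precedence; stability preserves left-to-right order within equal precedence.
import Mathlib
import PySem

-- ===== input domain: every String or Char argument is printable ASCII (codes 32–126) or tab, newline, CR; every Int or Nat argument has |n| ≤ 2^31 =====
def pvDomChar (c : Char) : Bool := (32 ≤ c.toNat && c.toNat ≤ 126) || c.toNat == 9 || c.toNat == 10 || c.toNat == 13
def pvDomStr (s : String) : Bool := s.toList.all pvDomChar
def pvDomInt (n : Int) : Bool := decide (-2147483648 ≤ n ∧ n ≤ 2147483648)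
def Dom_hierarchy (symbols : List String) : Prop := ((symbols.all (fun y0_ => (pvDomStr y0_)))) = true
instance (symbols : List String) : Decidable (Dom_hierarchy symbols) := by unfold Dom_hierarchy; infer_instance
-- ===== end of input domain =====

-- B replaces A's two-bucket partition by one stable descending sort of the index range keyed by precedence (idiomatic; not faster).

-- ===== PORT A =====
def scoreDictA : PySem.Dict String Int :=
  (((PySem.Dict.empty.insert "+" 0).insert "-" 0).insert "*" 1).insert "/" 1

-- A appends index `symbol` to symbolPos[score[symbols[symbol]]]; under Pre_ the score is 0 or 1,
-- so the two buckets are the pair components (sp.1 = bucket 0, sp.2 = bucket 1).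
def hierarchy (symbols : List String) : List Int :=
  let sp :=
    (PySem.List.pyRange 0 (symbols.length : Int) 1).foldl
      (fun (sp : List Int × List Int) (symbol : Int) =>
        if (scoreDictA.get? (PySem.List.pyGetD symbols symbol "")).getD 0 = 1
        then (sp.1, sp.2 ++ [symbol])
        else (sp.1 ++ [symbol], sp.2))
      ([], [])
  sp.2 ++ sp.1

-- ===== PORT B =====
def scoreDictB : PySem.Dict String Int :=
  (((PySem.Dict.empty.insert "+" 0).insert "-" 0).insert "*" 1).insert "/" 1

def hierarchy_alt (symbols : List String) : List Int :=
  PySem.List.sorted (PySem.List.pyRange 0 (symbols.length : Int) 1)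
    (fun i => (scoreDictB.get? (PySem.List.pyGetD symbols i "")).getD 0) true

-- ===== PRECONDITION & SPEC =====
-- Python A raises KeyError on any symbol outside the score dict; Pre_ admits exactly the known operators.
def Pre_hierarchy (symbols : List String) : Prop :=
  ∀ s ∈ symbols, s = "+" ∨ s = "-" ∨ s = "*" ∨ s = "/"
instance (symbols : List String) : Decidable (Pre_hierarchy symbols) := by unfold Pre_hierarchy; infer_instance
def pvWitness_hierarchy : List String := ["+", "*", "-", "/", "*"]

def Spec_hierarchy (symbols : List String) (out : List Int) : Prop := out = hierarchy_alt symbols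
instance (symbols : List String) (out : List Int) : Decidable (Spec_hierarchy symbols out) := by unfold Spec_hierarchy; infer_instance

-- ===== CLAIM (what is proved, stated in full; the proofs are below) =====
def Claim_equal_hierarchy : Prop := ∀ (symbols : List String), Dom_hierarchy symbols → Pre_hierarchy symbols → Spec_hierarchy symbols (hierarchy symbols)

-- ===== LEMMAS AND PROOFS =====

-- A's fold: the pair accumulates exactly the two filters of the traversed list.
theorem foldl_buckets (key : Int → Int) (l : List Int) (a0 a1 : List Int) :
    l.foldl
      (fun (sp : List Int × List Int) (i : Int) =>
        if key i = 1 then (sp.1, sp.2 ++ [i]) else (sp.1 ++ [i], sp.2))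
      (a0, a1)
    = (a0 ++ l.filter (fun i => decide ¬ (key i = 1)),
       a1 ++ l.filter (fun i => decide (key i = 1))) := by
  induction l generalizing a0 a1 with
  | nil => simp
  | cons x l ih =>
    by_cases hx : key x = 1 <;> simp [List.foldl_cons, hx, ih]

theorem insertBy_skip {α : Type} (before : α → α → Bool) (x : α) (l1 l2 : List α)
    (h : ∀ y ∈ l1, before x y = false) :
    PySem.List.insertBy before x (l1 ++ l2) = l1 ++ PySem.List.insertBy before x l2 := by
  induction l1 with
  | nil => simp
  | cons z zs ih =>
    have hz : before x z = false := h z (by simp)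
    have hstep : PySem.List.insertBy before x (z :: (zs ++ l2))
        = if before x z then x :: z :: (zs ++ l2)
          else z :: PySem.List.insertBy before x (zs ++ l2) := rfl
    simp only [List.cons_append, hstep, hz, Bool.false_eq_true, if_false]
    rw [ih (fun y hy => h y (by simp [hy]))]

theorem insertBy_last {α : Type} (before : α → α → Bool) (x : α) (l : List α)
    (h : ∀ y ∈ l, before x y = false) :
    PySem.List.insertBy before x l = l ++ [x] := by
  have := insertBy_skip before x l [] h
  simpa [PySem.List.insertBy] using this

-- B's stable descending insertion sort on a two-valued key is the 1-filter followed by the rest.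
theorem sorted_two_valued (key : Int → Int) (l : List Int) (A1 A0 : List Int)
    (h1 : ∀ y ∈ A1, key y = 1) (h0 : ∀ y ∈ A0, key y = 0)
    (hl : ∀ i ∈ l, key i = 0 ∨ key i = 1) :
    l.foldl (fun acc x => PySem.List.insertBy (fun a b => decide (key b < key a)) x acc) (A1 ++ A0)
    = (A1 ++ l.filter (fun i => decide (key i = 1))) ++ (A0 ++ l.filter (fun i => decide ¬ (key i = 1))) := by
  induction l generalizing A1 A0 with
  | nil => simp
  | cons x l ih =>
    rcases hl x (by simp) with hx | hx
    · -- key x = 0: x passes every element (keys are 0 or 1, never < 0) and lands at the end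
      have hall : ∀ y ∈ A1 ++ A0, decide (key y < key x) = false := by
        intro y hy
        rcases List.mem_append.mp hy with hy1 | hy0
        · simp [h1 y hy1, hx]
        · simp [h0 y hy0, hx]
      rw [List.foldl_cons, insertBy_last _ _ _ hall, List.append_assoc]
      rw [ih A1 (A0 ++ [x]) h1
        (by intro y hy; rcases List.mem_append.mp hy with h | h
            · exact h0 y h
            · simp at h; simp [h, hx])
        (fun i hi => hl i (by simp [hi]))]
      simp [hx]
    · -- key x = 1: x passes A1 (ties keep order) and is inserted before A0
      have hA1 : ∀ y ∈ A1, (fun a b => decide (key b < key a)) x y = false := by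
        intro y hy; simp [h1 y hy, hx]
      have hins : PySem.List.insertBy (fun a b => decide (key b < key a)) x (A1 ++ A0)
          = (A1 ++ [x]) ++ A0 := by
        rw [insertBy_skip _ _ _ _ hA1]
        cases A0 with
        | nil => simp [PySem.List.insertBy]
        | cons z zs =>
          have hz : key z = 0 := h0 z (by simp)
          simp [PySem.List.insertBy, hz, hx]
      rw [List.foldl_cons, hins]
      rw [ih (A1 ++ [x]) A0
        (by intro y hy; rcases List.mem_append.mp hy with h | h
            · exact h1 y h
            · simp at h; simp [h, hx])
        h0 (fun i hi => hl i (by simp [hi]))]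
      simp [hx]

-- the key both ports use, and its two-valuedness under Pre_
theorem key_two_valued (symbols : List String) (hpre : Pre_hierarchy symbols) :
    ∀ i ∈ PySem.List.pyRange 0 (symbols.length : Int) 1,
      (scoreDictA.get? (PySem.List.pyGetD symbols i "")).getD 0 = 0 ∨
      (scoreDictA.get? (PySem.List.pyGetD symbols i "")).getD 0 = 1 := by
  intro i hi
  have hb := (PySem.List.mem_pyRange_one).mp hi
  have hr : PySem.Raise.InRange symbols.length i :=
    ⟨by omega, by simpa using hb.2⟩
  have hmem : PySem.List.pyGetD symbols i "" ∈ symbols :=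
    PySem.List.pyGetD_mem (xs := symbols) (d := "") hr
  rcases hpre _ hmem with h | h | h | h <;> rw [h] <;> simp [scoreDictA] <;> decide

-- ===== VERDICT (by name: the statement is the Claim_ definition above) =====
theorem hierarchy_spec : Claim_equal_hierarchy := by
  intro symbols _ hpre
  unfold Spec_hierarchy hierarchy hierarchy_alt
  have hkey := key_two_valued symbols hpre
  rw [foldl_buckets]
  have hs : PySem.List.sorted (PySem.List.pyRange 0 (symbols.length : Int) 1)
      (fun i => (scoreDictA.get? (PySem.List.pyGetD symbols i "")).getD 0) true
    = (PySem.List.pyRange 0 (symbols.length : Int) 1).filter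
        (fun i => decide ((scoreDictA.get? (PySem.List.pyGetD symbols i "")).getD 0 = 1))
      ++ (PySem.List.pyRange 0 (symbols.length : Int) 1).filter
        (fun i => decide ¬ ((scoreDictA.get? (PySem.List.pyGetD symbols i "")).getD 0 = 1)) := by
    unfold PySem.List.sorted
    simpa using sorted_two_valued
      (fun i => (scoreDictA.get? (PySem.List.pyGetD symbols i "")).getD 0)
      (PySem.List.pyRange 0 (symbols.length : Int) 1) [] [] (by simp) (by simp) hkey
  rw [show scoreDictB = scoreDictA from rfl, hs]
  simp
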